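-- pv_equiv track=rewrite | github.com/trendyxlabspro/pgc-pleiotropy-discordance-explorer | src/harmonize.py | infer_column_map
-- ===== SOURCE A (Python) =====
-- from typing import Any, Iterable
--
-- _CANONICAL_COLUMNS = {
--     "snp": {"snp", "rsid", "rs_id", "id", "markername", "variant_id"},
--     "chr": {"chr", "chromosome", "#chrom", "chrom"},
--     "pos": {"bp", "pos", "position", "base_pair_location", "bp_hg19"},
--     "a1": {"a1", "alt", "effect_allele", "allele1", "ea"},
--     "a2": {"a2", "ref", "other_allele", "allele2", "nea"},
--     "beta": {"beta", "effect", "log_odds", "estimate"},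
--     "or": {"or", "odds_ratio"},
--     "se": {"se", "stderr", "standard_error", "sebeta"},
--     "p": {"p", "p_value", "p-value", "pval"},
--     "info": {"info", "imputation_info"},
--     "eaf": {"eaf", "maf", "freq", "frq", "effect_allele_frequency"},
--     "n": {"n", "neff", "n_total"},
--     "ncases": {"nca", "ncases", "n_cases"},
--     "ncontrols": {"nco", "ncontrols", "n_controls"},
--     "z": {"z", "zscore"},
--     "source_file": {"_source_file", "source_file"},
-- }
--
-- def infer_column_map(columns: Iterable[str]) -> dict[str, str]:
--     """Infer canonical GWAS column roles from heterogeneous source schemas."""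
--     resolved: dict[str, str] = {}
--     columns = list(columns)
--     lowered = {column.lower(): column for column in columns}
--
--     for canonical, aliases in _CANONICAL_COLUMNS.items():
--         for alias in aliases:
--             if alias in lowered:
--                 resolved[canonical] = lowered[alias]
--                 break
--
--     for column in columns:
--         lower = column.lower()
--         if "frq_a_" in lower or lower.startswith("freq1") or lower.endswith("_frequency"):
--             resolved.setdefault("eaf", column)
--         if lower.startswith("frq_u_"):
--             resolved.setdefault("control_freq", column)
--         if lower.startswith("heterogeneity") and lower.endswith("_p_value"):
--             resolved.setdefault("heterogeneity_p", column)
--         if lower in {"weight"} and "n" not in resolved: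
--             resolved["n"] = column
--         if lower.startswith("##fileformat"):
--             resolved.setdefault("header_only", column)
--
--     return resolved
-- ===== SOURCE B (Python) =====
-- _CANONICAL_COLUMNS = {
--     "snp": {"snp", "rsid", "rs_id", "id", "markername", "variant_id"},
--     "chr": {"chr", "chromosome", "#chrom", "chrom"},
--     "pos": {"bp", "pos", "position", "base_pair_location", "bp_hg19"},
--     "a1": {"a1", "alt", "effect_allele", "allele1", "ea"},
--     "a2": {"a2", "ref", "other_allele", "allele2", "nea"},
--     "beta": {"beta", "effect", "log_odds", "estimate"},
--     "or": {"or", "odds_ratio"},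
--     "se": {"se", "stderr", "standard_error", "sebeta"},
--     "p": {"p", "p_value", "p-value", "pval"},
--     "info": {"info", "imputation_info"},
--     "eaf": {"eaf", "maf", "freq", "frq", "effect_allele_frequency"},
--     "n": {"n", "neff", "n_total"},
--     "ncases": {"nca", "ncases", "n_cases"},
--     "ncontrols": {"nco", "ncontrols", "n_controls"},
--     "z": {"z", "zscore"},
--     "source_file": {"_source_file", "source_file"},
-- }
--
-- _ROLE_ORDER = list(_CANONICAL_COLUMNS)
-- _ALIAS_TO_ROLE = {
--     alias: role for role, aliases in _CANONICAL_COLUMNS.items() for alias in aliases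
-- }
--
-- _HEURISTIC_RULES = [
--     (lambda t: "frq_a_" in t or t.startswith("freq1") or t.endswith("_frequency"), "eaf"),
--     (lambda t: t.startswith("frq_u_"), "control_freq"),
--     (lambda t: t.startswith("heterogeneity") and t.endswith("_p_value"), "heterogeneity_p"),
--     (lambda t: t == "weight", "n"),
--     (lambda t: t.startswith("##fileformat"), "header_only"),
-- ]
--
-- def infer_column_map(columns):
--     """Infer canonical GWAS column roles from heterogeneous source schemas."""
--     columns = list(columns)
--     hits = {}
--     for column in columns:
--         role = _ALIAS_TO_ROLE.get(column.lower())
--         if role is not None: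
--             hits[role] = column
--     resolved = {role: hits[role] for role in _ROLE_ORDER if role in hits}
--     for column in columns:
--         lower = column.lower()
--         for pred, key in _HEURISTIC_RULES:
--             if pred(lower) and key not in resolved:
--                 resolved[key] = column
--     return resolved
-- ===== Notes on version B (the rewrite author's own statement) =====
-- stated objective: idiomatic
-- what changed: Replaces A's lowered-columns dict plus a nested per-role scan over alias sets by a flat precomputed alias-to-role reverse dict and a single last-wins pass over the columns (with the heuristic rules applied as a data-driven rule table in A's order).
-- outside the precondition, e.g. on infer_column_map(['p', 'pval']): A returns {'p': 'p'}, B returns {'p': 'pval'}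
import Mathlib
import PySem

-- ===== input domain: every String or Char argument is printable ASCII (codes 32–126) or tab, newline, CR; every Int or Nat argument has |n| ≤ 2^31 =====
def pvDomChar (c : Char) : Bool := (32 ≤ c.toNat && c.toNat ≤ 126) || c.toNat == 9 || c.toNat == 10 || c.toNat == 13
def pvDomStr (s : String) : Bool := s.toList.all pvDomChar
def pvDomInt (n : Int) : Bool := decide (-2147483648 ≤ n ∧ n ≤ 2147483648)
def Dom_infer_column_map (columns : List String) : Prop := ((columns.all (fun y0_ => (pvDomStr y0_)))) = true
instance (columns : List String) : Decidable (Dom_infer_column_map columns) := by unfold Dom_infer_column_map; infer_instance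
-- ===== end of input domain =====

-- B replaces A's per-role scan of alias sets against a lowered-columns dict by a flat reverse
-- alias→role dict and one last-wins pass over the columns (objective: idiomatic; same cost).

-- _CANONICAL_COLUMNS, shared module constant. The alias SETS are ported in the literal's written
-- order; Python set iteration order is unspecified, and inside Pre_ it cannot affect the result.
def pvCanonTable : List (String × List String) :=
  [ ("snp", ["snp", "rsid", "rs_id", "id", "markername", "variant_id"]),
    ("chr", ["chr", "chromosome", "#chrom", "chrom"]),
    ("pos", ["bp", "pos", "position", "base_pair_location", "bp_hg19"]),
    ("a1", ["a1", "alt", "effect_allele", "allele1", "ea"]),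
    ("a2", ["a2", "ref", "other_allele", "allele2", "nea"]),
    ("beta", ["beta", "effect", "log_odds", "estimate"]),
    ("or", ["or", "odds_ratio"]),
    ("se", ["se", "stderr", "standard_error", "sebeta"]),
    ("p", ["p", "p_value", "p-value", "pval"]),
    ("info", ["info", "imputation_info"]),
    ("eaf", ["eaf", "maf", "freq", "frq", "effect_allele_frequency"]),
    ("n", ["n", "neff", "n_total"]),
    ("ncases", ["nca", "ncases", "n_cases"]),
    ("ncontrols", ["nco", "ncontrols", "n_controls"]),
    ("z", ["z", "zscore"]),
    ("source_file", ["_source_file", "source_file"]) ]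

-- ===== PORT A =====
-- lowered = {column.lower(): column for column in columns}
def pvLoweredA (columns : List String) : PySem.Dict String String :=
  columns.foldl (fun d c => d.insert (PySem.Str.lower c) c) PySem.Dict.empty

-- for canonical, aliases: for alias in aliases: if alias in lowered: resolved[canonical] = lowered[alias]; break
def pvPhase1A (lowered : PySem.Dict String String) : PySem.Dict String String :=
  pvCanonTable.foldl
    (fun d rc =>
      match rc.2.findSome? (fun a => lowered.get? a) with
      | some v => d.insert rc.1 v
      | none => d)
    PySem.Dict.empty

-- the second loop's body: the five heuristic if-statements, in A's order
def pvStepA (acc : PySem.Dict String String) (column : String) : PySem.Dict String String :=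
  let lower := PySem.Str.lower column
  let acc := if PySem.Str.isIn "frq_a_" lower || PySem.Str.startswith lower "freq1" || PySem.Str.endswith lower "_frequency" then acc.setdefault "eaf" column else acc
  let acc := if PySem.Str.startswith lower "frq_u_" then acc.setdefault "control_freq" column else acc
  let acc := if PySem.Str.startswith lower "heterogeneity" && PySem.Str.endswith lower "_p_value" then acc.setdefault "heterogeneity_p" column else acc
  let acc := if ["weight"].contains lower && !(acc.contains "n") then acc.insert "n" column else acc
  let acc := if PySem.Str.startswith lower "##fileformat" then acc.setdefault "header_only" column else acc
  acc

def infer_column_map (columns : List String) : List (String × String) :=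
  let lowered := pvLoweredA columns
  let resolved := pvPhase1A lowered
  (columns.foldl pvStepA resolved).items

-- ===== PORT B =====
-- _ROLE_ORDER = list(_CANONICAL_COLUMNS)
def pvRoleOrder : List String := pvCanonTable.map (fun rc => rc.1)

-- _ALIAS_TO_ROLE = {alias: role for role, aliases in _CANONICAL_COLUMNS.items() for alias in aliases}
def pvAliasToRole : PySem.Dict String String :=
  pvCanonTable.foldl (fun d rc => rc.2.foldl (fun d a => d.insert a rc.1) d) PySem.Dict.empty

-- hits[role] = column for every column whose lowercase is a known alias (last one wins)
def pvHitsB (columns : List String) : PySem.Dict String String :=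
  columns.foldl
    (fun h c =>
      match pvAliasToRole.get? (PySem.Str.lower c) with
      | some role => h.insert role c
      | none => h)
    PySem.Dict.empty

-- resolved = {role: hits[role] for role in _ROLE_ORDER if role in hits}
def pvResolvedB (hits : PySem.Dict String String) : PySem.Dict String String :=
  pvRoleOrder.foldl
    (fun d role =>
      match hits.get? role with
      | some v => d.insert role v
      | none => d)
    PySem.Dict.empty

-- _HEURISTIC_RULES: (predicate on the lowercased column, key) pairs, in A's rule order
def pvRulesB : List ((String → Bool) × String) :=
  [ (fun t => PySem.Str.isIn "frq_a_" t || PySem.Str.startswith t "freq1" || PySem.Str.endswith t "_frequency", "eaf"),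
    (fun t => PySem.Str.startswith t "frq_u_", "control_freq"),
    (fun t => PySem.Str.startswith t "heterogeneity" && PySem.Str.endswith t "_p_value", "heterogeneity_p"),
    (fun t => t == "weight", "n"),
    (fun t => PySem.Str.startswith t "##fileformat", "header_only") ]

-- for pred, key in _HEURISTIC_RULES: if pred(lower) and key not in resolved: resolved[key] = column
def pvStepB (acc : PySem.Dict String String) (column : String) : PySem.Dict String String :=
  let lower := PySem.Str.lower column
  pvRulesB.foldl (fun acc pk => if pk.1 lower && !(acc.contains pk.2) then acc.insert pk.2 column else acc) acc

def infer_column_map_alt (columns : List String) : List (String × String) :=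
  let hits := pvHitsB columns
  let resolved := pvResolvedB hits
  (columns.foldl pvStepB resolved).items

-- ===== PRECONDITION & SPEC =====
-- Pre_ excludes inputs where two or more DISTINCT lowercased aliases of one canonical role occur among
-- the columns: there A's answer depends on Python's hash-randomised set iteration order (A is
-- nondeterministic across interpreter runs), so neither choice is specified; B keeps the last column.
def Pre_infer_column_map (columns : List String) : Prop :=
  ∀ rc ∈ pvCanonTable, ∀ c1 ∈ columns, ∀ c2 ∈ columns,
    PySem.Str.lower c1 ∈ rc.2 → PySem.Str.lower c2 ∈ rc.2 →
      PySem.Str.lower c1 = PySem.Str.lower c2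
instance (columns : List String) : Decidable (Pre_infer_column_map columns) := by
  unfold Pre_infer_column_map; infer_instance

def pvWitness_infer_column_map : List String := ["SNP", "Chromosome", "BP", "A1", "A2", "P", "FRQ_A_1234", "weight"]

def Spec_infer_column_map (columns : List String) (out : List (String × String)) : Prop := out = infer_column_map_alt columns
instance (columns : List String) (out : List (String × String)) : Decidable (Spec_infer_column_map columns out) := by unfold Spec_infer_column_map; infer_instance

-- ===== CLAIM (what is proved, stated in full; the proofs are below) =====
def Claim_equal_infer_column_map : Prop := ∀ (columns : List String), Dom_infer_column_map columns → Pre_infer_column_map columns → Spec_infer_column_map columns (infer_column_map columns)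

-- ===== LEMMAS AND PROOFS =====

-- `if p then setdefault else ·` is the guarded insert B's rule loop performs
theorem pv_sd (d : PySem.Dict String String) (k v : String) (p : Bool) :
    (if p = true then d.setdefault k v else d) = (if (p && !d.contains k) = true then d.insert k v else d) := by
  cases p
  · simp
  · cases h : d.contains k
    · simp [PySem.Dict.setdefault, PySem.Dict.insert, h]
    · simp [PySem.Dict.setdefault, h]

-- the two heuristic loop bodies agree (setdefault = guarded insert, B's rule list unrolled)
theorem pv_step_eq (acc : PySem.Dict String String) (c : String) : pvStepA acc c = pvStepB acc c := by
  unfold pvStepA pvStepB pvRulesB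
  simp only [List.foldl_cons, List.foldl_nil, pv_sd, List.contains_cons, List.contains_nil,
    Bool.or_false]

-- last-wins characterisation of a fold of inserts keyed by the lowercased column
theorem pv_lowered_aux (columns : List String) (d : PySem.Dict String String) (k : String) :
    (columns.foldl (fun d c => d.insert (PySem.Str.lower c) c) d).get? k =
      ((columns.reverse.find? (fun c => PySem.Str.lower c == k)).or (d.get? k)) := by
  induction columns generalizing d with
  | nil => simp
  | cons c cs ih =>
    rw [List.foldl_cons, ih, List.reverse_cons, List.find?_append]
    cases h : cs.reverse.find? (fun c => PySem.Str.lower c == k) with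
    | some v => simp
    | none =>
      cases hc : (PySem.Str.lower c == k) with
      | true =>
        simp only [Option.none_or, List.find?_singleton, hc, if_pos, Option.some_or]
        rw [← beq_iff_eq.mp hc]
        exact PySem.Dict.get?_insert_self d (PySem.Str.lower c) c
      | false =>
        simp only [Option.none_or, List.find?_singleton, hc]
        simp only [Bool.false_eq_true, if_false, Option.none_or]
        apply PySem.Dict.get?_insert_of_ne
        exact fun he => by simp [he] at hc

-- last-wins characterisation of B's hits fold
theorem pv_hits_aux (a2r : PySem.Dict String String) (columns : List String)
    (d : PySem.Dict String String) (r : String) :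
    (columns.foldl (fun h c =>
        match a2r.get? (PySem.Str.lower c) with
        | some role => h.insert role c
        | none => h) d).get? r =
      ((columns.reverse.find? (fun c => a2r.get? (PySem.Str.lower c) == some r)).or (d.get? r)) := by
  induction columns generalizing d with
  | nil => simp
  | cons c cs ih =>
    rw [List.foldl_cons, ih, List.reverse_cons, List.find?_append]
    cases h : cs.reverse.find? (fun c => a2r.get? (PySem.Str.lower c) == some r) with
    | some v => simp
    | none =>
      simp only [Option.none_or, List.find?_singleton]
      cases hg : a2r.get? (PySem.Str.lower c) with
      | none => simp
      | some role =>
        by_cases hr : role = r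
        · subst hr
          simp only [BEq.rfl, if_pos, Option.some_or]
          exact PySem.Dict.get?_insert_self d role c
        · have hne : (some role == some r) = false := by simp [hr]
          simp only [hne, Bool.false_eq_true, if_false, Option.none_or]
          apply PySem.Dict.get?_insert_of_ne
          exact fun he => hr he.symm

theorem pv_find?_congr (p q : String → Bool) (l : List String) (h : ∀ x ∈ l, p x = q x) :
    l.find? p = l.find? q := by
  induction l with
  | nil => rfl
  | cons a l ih =>
    simp only [List.find?_cons, h a (by simp)]
    cases q a
    · exact ih fun x hx => h x (by simp [hx])
    · rfl

-- findSome? over a list where at most the element a0 can answer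
theorem pv_findSome?_single (f : String → Option String) (l : List String) (a0 : String)
    (ha : a0 ∈ l) (h : ∀ a ∈ l, a ≠ a0 → f a = none) : l.findSome? f = f a0 := by
  induction l with
  | nil => cases ha
  | cons b l ih =>
    rw [List.findSome?_cons]
    by_cases hb : b = a0
    · subst hb
      cases hf : f b with
      | some v => rfl
      | none =>
        show List.findSome? f l = none
        exact List.findSome?_eq_none_iff.mpr
          (fun x hx => if hxa : x = b then hxa ▸ hf else h x (by simp [hx]) hxa)
    · rw [h b (by simp) hb]
      have ha' : a0 ∈ l := by
        rcases List.mem_cons.mp ha with h' | h'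
        · exact absurd h'.symm hb
        · exact h'
      exact ih ha' (fun a hal => h a (by simp [hal]))

-- the reverse map, flattened
def pvFlat : List (String × String) :=
  (pvCanonTable.flatMap (fun rc => rc.2.map (fun a => (a, rc.1))))

set_option maxRecDepth 4096 in
theorem pv_a2r_mk : pvAliasToRole = PySem.Dict.mk pvFlat := by decide

set_option maxRecDepth 4096 in
theorem pv_flat_nodup : (pvFlat.map Prod.fst).Nodup := by decide

set_option maxRecDepth 4096 in
theorem pv_roles_nodup : (pvCanonTable.map Prod.fst).Nodup := by decide

theorem pv_a2r_some (t r : String) :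
    pvAliasToRole.get? t = some r ↔ (t, r) ∈ pvFlat := by
  rw [pv_a2r_mk]
  exact PySem.Dict.get?_eq_some_iff_mem_items _ t r (by simpa [PySem.Dict.keys_mk] using pv_flat_nodup)

theorem pv_flat_mem (t r : String) :
    (t, r) ∈ pvFlat ↔ ∃ rc ∈ pvCanonTable, rc.1 = r ∧ t ∈ rc.2 := by
  simp only [pvFlat, List.mem_flatMap, List.mem_map]
  constructor
  · rintro ⟨rc, hrc, a, ha, he⟩
    cases he
    exact ⟨rc, hrc, rfl, ha⟩
  · rintro ⟨rc, hrc, h1, h2⟩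
    exact ⟨rc, hrc, t, h2, by rw [h1]⟩

-- the reverse map sends a string to role rc.1 exactly when it is one of rc's aliases
theorem pv_a2r_role (rc : String × List String) (hrc : rc ∈ pvCanonTable) (t : String) :
    pvAliasToRole.get? t = some rc.1 ↔ t ∈ rc.2 := by
  rw [pv_a2r_some, pv_flat_mem]
  constructor
  · rintro ⟨rc', hrc', h1, h2⟩
    have : rc' = rc := List.inj_on_of_nodup_map pv_roles_nodup hrc' hrc h1
    exact this ▸ h2
  · intro ht
    exact ⟨rc, hrc, rfl, ht⟩

theorem pv_lowered_get (columns : List String) (a : String) :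
    (pvLoweredA columns).get? a = columns.reverse.find? (fun c => PySem.Str.lower c == a) := by
  unfold pvLoweredA
  rw [pv_lowered_aux]
  simp

theorem pv_hits_get (columns : List String) (r : String) :
    (pvHitsB columns).get? r =
      columns.reverse.find? (fun c => pvAliasToRole.get? (PySem.Str.lower c) == some r) := by
  unfold pvHitsB
  rw [pv_hits_aux]
  simp

-- per-role agreement of the two phase-1 results, under Pre_
theorem pv_role_agree (columns : List String) (h : Pre_infer_column_map columns)
    (rc : String × List String) (hrc : rc ∈ pvCanonTable) :
    rc.2.findSome? (fun a => (pvLoweredA columns).get? a) = (pvHitsB columns).get? rc.1 := by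
  rw [pv_hits_get]
  rw [pv_find?_congr _ (fun c => rc.2.contains (PySem.Str.lower c)) _
    (fun c _ => by rw [Bool.eq_iff_iff]; simp [pv_a2r_role rc hrc])]
  by_cases hex : ∃ c ∈ columns, PySem.Str.lower c ∈ rc.2
  · obtain ⟨c0, hc0, ha0⟩ := hex
    have huni : ∀ c ∈ columns, PySem.Str.lower c ∈ rc.2 → PySem.Str.lower c = PySem.Str.lower c0 :=
      fun c hc hcm => h rc hrc c hc c0 hc0 hcm ha0
    rw [pv_findSome?_single _ _ (PySem.Str.lower c0) ha0 ?side]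
    case side =>
      intro a ha hne
      rw [pv_lowered_get]
      refine List.find?_eq_none.mpr (fun c hc => ?_)
      simp only [beq_iff_eq]
      intro he
      exact hne (he ▸ huni c (List.mem_reverse.mp hc) (he ▸ ha))
    rw [pv_lowered_get]
    refine pv_find?_congr _ _ _ (fun c hc => ?_)
    rw [Bool.eq_iff_iff]
    simp only [beq_iff_eq, List.contains_iff_mem]
    exact ⟨fun he => he ▸ ha0, fun hm => huni c (List.mem_reverse.mp hc) hm⟩
  · have hex : ∀ c ∈ columns, PySem.Str.lower c ∉ rc.2 := by simpa using hex
    rw [List.find?_eq_none.mpr (fun c hc => by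
      simpa using hex c (List.mem_reverse.mp hc))]
    refine List.findSome?_eq_none_iff.mpr (fun a ha => ?_)
    rw [pv_lowered_get]
    refine List.find?_eq_none.mpr (fun c hc => ?_)
    simp only [beq_iff_eq]
    exact fun he => hex c (List.mem_reverse.mp hc) (he ▸ ha)

theorem pv_phase1_eq (columns : List String) (h : Pre_infer_column_map columns) :
    pvPhase1A (pvLoweredA columns) = pvResolvedB (pvHitsB columns) := by
  unfold pvPhase1A pvResolvedB pvRoleOrder
  rw [List.foldl_map]
  exact PySem.List.foldl_congr_mem _ _ _ _
    (fun d rc hrc => by rw [pv_role_agree columns h rc hrc])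

-- ===== VERDICT (by name: the statement is the Claim_ definition above) =====
theorem infer_column_map_spec : Claim_equal_infer_column_map := by
  intro columns _ hpre
  show (columns.foldl pvStepA (pvPhase1A (pvLoweredA columns))).items
      = (columns.foldl pvStepB (pvResolvedB (pvHitsB columns))).items
  rw [pv_phase1_eq columns hpre]
  exact congrArg PySem.Dict.items (PySem.List.foldl_congr_mem _ _ _ _ (fun acc x _ => pv_step_eq acc x))
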